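-- pv_equiv track=rewrite | github.com/lifesaver0129/Basic-DL | Recommendation/ASOS_MyFunction.py | recategorize_1
-- ===== SOURCE A (Python) =====
-- def del_null_in_list(inputList):
--     output_List = []
--     if inputList is not None:
--         for ele_input_list in inputList:
--             if ele_input_list != '':
--                 output_List.append(ele_input_list)
--     return output_List
--
-- def list_to_string(inputList):
--     outputString = ''
--     if inputList is not None:
--         for ele in inputList:
--             outputString = outputString + str(ele) + ';'
--     return outputString.strip(';')
--
-- def recategorize_1(productIDList, productInfoList, keywordList):
--     outputList = []#output list
--     for productInfoList_number in range(len(productInfoList)):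
--         hitlist = []# hit category list
--         productID = productIDList[productInfoList_number]#this is the productId of each product
--         productContent = productInfoList[productInfoList_number].strip('\n')#strip the '\n' of each row
--
--         list_productContent = productContent.split(';')#split each product content into a list
--         list_productContent = del_null_in_list(list_productContent)##del null elements in list
--
--         for ele_list_productContent in list_productContent:#for each element in product list
--             #for ele_keywordList in keywordList:#for each row in the keyword file
--             for ele_keywordList in keywordList[2:]:#for each row in the keyword file
--                 ele_keywordList = ele_keywordList.strip('\n')#strip '\n' in each row
--                 ele_keywordList = ele_keywordList.lower()#change each row in to lower character
--                 list_ele_keywordList = ele_keywordList.split(';')#split the keyword string into a string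
--                 list_ele_keywordList = del_null_in_list(list_ele_keywordList)##del null elements in list
--
--                 cate = list_ele_keywordList[0]# the first element is the category name of each row
--                 for ele_list_ele_keywordList in list_ele_keywordList:#for each element in each row, if a word in the list
--                     if ele_list_productContent == ele_list_ele_keywordList:
--                         hitlist.append(cate)#store the category name
--         data = [productID, list_to_string(hitlist)]#productID and hitlist
--         outputList.append(data)#append to the output list
--     return outputList
-- ===== SOURCE B (Python) =====
-- def recategorize_1(productIDList, productInfoList, keywordList):
--     # Build once: word -> list of category names (one entry per matching
--     # occurrence, in keyword-row order), then a single lookup per product word.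
--     index = {}
--     for row in keywordList[2:]:
--         words = [w for w in row.strip('\n').lower().split(';') if w != '']
--         if words:
--             cate = words[0]
--             for w in words:
--                 index.setdefault(w, []).append(cate)
--     outputList = []
--     for i, info in enumerate(productInfoList):
--         hits = []
--         for w in info.strip('\n').split(';'):
--             if w != '':
--                 hits.extend(index.get(w, []))
--         outputList.append([productIDList[i], ';'.join(hits)])
--     return outputList
-- ===== Notes on version B (the rewrite author's own statement) =====
-- stated objective: faster
-- what changed: A rescans every keyword row (and every word in it) for every content word of every product; B builds a word-to-categories dict once from the keyword rows and then does a single hash lookup per product content word.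
import Mathlib
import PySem

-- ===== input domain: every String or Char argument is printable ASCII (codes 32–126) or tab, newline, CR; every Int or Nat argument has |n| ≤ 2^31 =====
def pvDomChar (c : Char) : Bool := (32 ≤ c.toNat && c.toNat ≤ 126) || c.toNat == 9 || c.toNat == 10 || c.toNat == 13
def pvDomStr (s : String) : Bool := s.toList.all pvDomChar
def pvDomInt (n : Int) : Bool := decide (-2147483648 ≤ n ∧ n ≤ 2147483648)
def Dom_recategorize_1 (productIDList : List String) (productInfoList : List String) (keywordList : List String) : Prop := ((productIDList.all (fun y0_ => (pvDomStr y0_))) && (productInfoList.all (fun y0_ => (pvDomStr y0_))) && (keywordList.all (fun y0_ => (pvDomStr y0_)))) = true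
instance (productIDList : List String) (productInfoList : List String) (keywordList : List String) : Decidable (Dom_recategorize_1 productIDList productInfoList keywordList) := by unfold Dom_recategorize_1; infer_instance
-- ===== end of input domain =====

-- B replaces A's per-product-word rescan of every keyword row (O(P·C·K·L)) by a word→categories
-- index built once from the keyword rows, then one dict lookup per product word (O(K·L + P·C)).

-- ===== PORT A =====
-- port of del_null_in_list (the None branch is unreachable: callers always pass a list)
def pvDelNull (l : List (List Char)) : List (List Char) :=
  l.foldl (fun out e => if e != [] then out ++ [e] else out) []

-- port of list_to_string; string concatenation is done on List Char (PySem.Chars), exact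
def pvListToString (l : List (List Char)) : List Char :=
  PySem.Chars.stripChars (l.foldl (fun s e => s ++ e ++ [';']) []) [';']

def recategorize_1 (productIDList : List String) (productInfoList : List String) (keywordList : List String) : List (List String) :=
  (PySem.List.pyRange 0 (productInfoList.length : Int)).foldl (fun outputList i =>
    -- productIDList[i]: IndexError (pyGet? = none) excluded by Pre_
    let productID := (PySem.List.pyGet? productIDList i).getD ""
    let productContent := PySem.Chars.stripChars ((PySem.List.pyGet? productInfoList i).getD "").toList ['\n']
    let list_productContent := pvDelNull (PySem.Chars.splitOn productContent [';'])
    let hitlist := list_productContent.foldl (fun hitlist w =>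
      (PySem.List.slice keywordList (some 2) none).foldl (fun hitlist row =>
        let r := PySem.Chars.lower (PySem.Chars.stripChars row.toList ['\n'])
        let lk := pvDelNull (PySem.Chars.splitOn r [';'])
        -- lk[0]: IndexError when lk = [] is excluded by Pre_ (the default is then never appended)
        let cate := (PySem.List.pyGet? lk 0).getD []
        lk.foldl (fun hitlist x => if w == x then hitlist ++ [cate] else hitlist) hitlist) hitlist) []
    outputList ++ [[productID, String.ofList (pvListToString hitlist)]]) []

-- ===== PORT B =====
def recategorize_1_alt (productIDList : List String) (productInfoList : List String) (keywordList : List String) : List (List String) :=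
  let index := (PySem.List.slice keywordList (some 2) none).foldl (fun index row =>
    let words := (PySem.Chars.splitOn (PySem.Chars.lower (PySem.Chars.stripChars row.toList ['\n'])) [';']).filter (fun w => w != [])
    if words != [] then
      let cate := words.headD []
      -- index.setdefault(w, []).append(cate)  ==  index[w] = index.get(w, []) + [cate]
      words.foldl (fun index w => index.modify w [] (· ++ [cate])) index
    else index) PySem.Dict.empty
  (PySem.List.enumerate productInfoList).foldl (fun outputList p =>
    let hits := (PySem.Chars.splitOn (PySem.Chars.stripChars p.2.toList ['\n']) [';']).foldl
      (fun hits w => if w != [] then hits ++ index.getD w [] else hits) []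
    -- productIDList[i]: IndexError excluded by Pre_
    outputList ++ [[(PySem.List.pyGet? productIDList p.1).getD "", String.ofList (PySem.Chars.join [';'] hits)]]) []

-- ===== PRECONDITION & SPEC =====
-- the cleaned word list of a keyword row / of a product's content (used only by Pre_ and the proofs)
def pvKwWords (row : String) : List (List Char) :=
  (PySem.Chars.splitOn (PySem.Chars.lower (PySem.Chars.stripChars row.toList ['\n'])) [';']).filter (fun w => w != [])
def pvPcWords (info : String) : List (List Char) :=
  (PySem.Chars.splitOn (PySem.Chars.stripChars info.toList ['\n']) [';']).filter (fun w => w != [])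

-- Pre_ excludes exactly the inputs on which the Python A raises IndexError: a productIDList shorter
-- than productInfoList, and a keyword row with no words while some product has a content word
-- (A then evaluates row[0] of an empty list); on every other input A returns normally.
def Pre_recategorize_1 (productIDList : List String) (productInfoList : List String) (keywordList : List String) : Prop :=
  productInfoList.length ≤ productIDList.length ∧
  ((∀ row ∈ keywordList.drop 2, pvKwWords row ≠ []) ∨ (∀ info ∈ productInfoList, pvPcWords info = []))
instance (productIDList : List String) (productInfoList : List String) (keywordList : List String) : Decidable (Pre_recategorize_1 productIDList productInfoList keywordList) := by unfold Pre_recategorize_1; infer_instance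

def pvWitness_recategorize_1 : List String × List String × List String :=
  (["id1", "id2"], ["shoe;red\n", ""], ["header1", "header2", "Footwear;Shoe;boot"])

def Spec_recategorize_1 (productIDList : List String) (productInfoList : List String) (keywordList : List String) (out : List (List String)) : Prop := out = recategorize_1_alt productIDList productInfoList keywordList
instance (productIDList : List String) (productInfoList : List String) (keywordList : List String) (out : List (List String)) : Decidable (Spec_recategorize_1 productIDList productInfoList keywordList out) := by unfold Spec_recategorize_1; infer_instance

-- ===== CLAIM (what is proved, stated in full; the proofs are below) =====
def Claim_equal_recategorize_1 : Prop := ∀ (productIDList : List String) (productInfoList : List String) (keywordList : List String), Dom_recategorize_1 productIDList productInfoList keywordList → Pre_recategorize_1 productIDList productInfoList keywordList → Spec_recategorize_1 productIDList productInfoList keywordList (recategorize_1 productIDList productInfoList keywordList)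

-- ===== LEMMAS AND PROOFS =====

theorem pv_splitOn_go_clean (fuel : Nat) : ∀ (l cur : List Char) (acc : List (List Char)),
    l.length < fuel → (∀ x ∈ acc, ';' ∉ x) → (';' ∉ cur) →
    ∀ p ∈ PySem.Chars.splitOn.go [';'] fuel l cur acc, ';' ∉ p := by
  induction fuel with
  | zero => intro l cur acc h; omega
  | succ n ih =>
    intro l cur acc hf hacc hcur p hp
    cases l with
    | nil =>
      simp [PySem.Chars.splitOn.go] at hp
      rcases hp with h | h
      · exact hacc _ h
      · subst h; simpa using hcur
    | cons c rest =>
      rw [PySem.Chars.splitOn.go] at hp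
      by_cases hc : c = ';'
      · have hpre : [';'].isPrefixOf (c :: rest) = true := by simp [hc, List.isPrefixOf]
        rw [if_pos hpre] at hp
        refine ih _ [] (cur.reverse :: acc) (by simp at hf ⊢; omega) ?_ (by simp) p hp
        intro x hx
        rcases List.mem_cons.mp hx with h | h
        · subst h; simpa using hcur
        · exact hacc _ h
      · have hpre : [';'].isPrefixOf (c :: rest) = false := by
          simp [List.isPrefixOf]; exact fun h => (hc h.symm).elim
        rw [if_neg (by simp [hpre])] at hp
        refine ih rest (c :: cur) acc (by simp at hf ⊢; omega) hacc ?_ p hp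
        intro hx
        rcases List.mem_cons.mp hx with h | h
        · exact hc h.symm
        · exact hcur h

theorem pv_splitOn_clean (s : List Char) : ∀ p ∈ PySem.Chars.splitOn s [';'], ';' ∉ p := by
  unfold PySem.Chars.splitOn
  exact pv_splitOn_go_clean (s.length + 1) s [] [] (by omega) (by simp) (by simp)

theorem pv_join_facts (l : List (List Char)) (hne : l ≠ []) (h : ∀ e ∈ l, e ≠ [] ∧ ';' ∉ e) :
    (∃ c t, PySem.Chars.join [';'] l = c :: t ∧ c ≠ ';') ∧
    (∃ c, (PySem.Chars.join [';'] l).getLast? = some c ∧ c ≠ ';') ∧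
    List.flatMap (fun e => e ++ [';']) l = PySem.Chars.join [';'] l ++ [';'] := by
  induction l with
  | nil => exact (hne rfl).elim
  | cons e l' ih =>
    obtain ⟨he, hes⟩ := h e (by simp)
    obtain ⟨c, t, hct⟩ : ∃ c t, e = c :: t := by cases e with | nil => exact (he rfl).elim | cons a b => exact ⟨a, b, rfl⟩
    have hc : c ≠ ';' := fun hh => hes (by simp [hct, hh])
    subst hct
    cases l' with
    | nil =>
      refine ⟨⟨c, t, by simp [PySem.Chars.join_singleton], hc⟩, ?_, by simp [PySem.Chars.join_singleton]⟩
      refine ⟨(c :: t).getLast (by simp), ?_, fun hh => hes (hh ▸ List.getLast_mem (by simp))⟩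
      simp [PySem.Chars.join_singleton, List.getLast?_eq_some_getLast]
    | cons f l'' =>
      obtain ⟨⟨c', t', hj, hc'⟩, ⟨cl, hcl, hcl2⟩, hfm⟩ := ih (by simp) (fun x hx => h x (by simp [hx]))
      have hjoin : PySem.Chars.join [';'] ((c :: t) :: f :: l'') = (c :: t) ++ [';'] ++ PySem.Chars.join [';'] (f :: l'') :=
        PySem.Chars.join_cons_cons ..
      refine ⟨⟨c, t ++ [';'] ++ PySem.Chars.join [';'] (f :: l''), by simp [hjoin], hc⟩, ?_, ?_⟩
      · refine ⟨cl, ?_, hcl2⟩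
        rw [hjoin, List.getLast?_append_of_ne_nil, hcl]
        simp [hj]
      · rw [List.flatMap_cons, hfm, hjoin]
        simp

theorem pv_listToString_eq_join (l : List (List Char)) (h : ∀ e ∈ l, e ≠ [] ∧ ';' ∉ e) :
    pvListToString l = PySem.Chars.join [';'] l := by
  unfold pvListToString
  have hfold : l.foldl (fun s e => s ++ e ++ [';']) [] = List.flatMap (fun e => e ++ [';']) l := by
    have : (fun (s e : List Char) => s ++ e ++ [';']) = fun s e => s ++ (e ++ [';']) := by
      funext s e; simp
    rw [this]
    simpa using PySem.List.foldl_append_eq_flatMap (fun e => e ++ [';']) l []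
  rw [hfold]
  cases l with
  | nil => rfl
  | cons e l' =>
    obtain ⟨⟨c, t, hj, hc⟩, ⟨cl, hcl, hcl2⟩, hfm⟩ := pv_join_facts (e :: l') (by simp) h
    rw [hfm]
    have hsc : ∀ s : List Char, PySem.Chars.stripChars s [';'] = (List.dropWhile (fun c => [';'].contains c) (List.dropWhile (fun c => [';'].contains c) s).reverse).reverse := fun s => rfl
    rw [hsc]
    have h1 : List.dropWhile (fun c => [';'].contains c) (PySem.Chars.join [';'] (e :: l') ++ [';'])
        = PySem.Chars.join [';'] (e :: l') ++ [';'] := by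
      rw [hj]; simp [hc]
    rw [h1]
    have h2 : (PySem.Chars.join [';'] (e :: l') ++ [';']).reverse = ';' :: (PySem.Chars.join [';'] (e :: l')).reverse := by simp
    rw [h2]
    have h3 : List.dropWhile (fun c => [';'].contains c) (';' :: (PySem.Chars.join [';'] (e :: l')).reverse)
        = List.dropWhile (fun c => [';'].contains c) (PySem.Chars.join [';'] (e :: l')).reverse := by
      simp
    rw [h3]
    obtain ⟨m, hm⟩ : ∃ m, (PySem.Chars.join [';'] (e :: l')).reverse = cl :: m := by
      have := List.getLast?_eq_head?_reverse (xs := PySem.Chars.join [';'] (e :: l'))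
      rw [hcl] at this
      cases hrev : (PySem.Chars.join [';'] (e :: l')).reverse with
      | nil => rw [hrev] at this; simp at this
      | cons a b => rw [hrev] at this; simp at this; exact ⟨b, by rw [this]⟩
    rw [hm]
    simp only [List.dropWhile_cons, List.contains_cons, List.contains_nil, Bool.or_false, beq_iff_eq]
    rw [if_neg (by simpa using fun hh => hcl2 hh)]
    have := congrArg List.reverse hm
    simpa using this.symm

def pvCate (row : String) : List Char := (pvKwWords row).headD []
def pvHits (keywordList : List String) (w : List Char) : List (List Char) :=
  (keywordList.drop 2).flatMap (fun row => ((pvKwWords row).filter (fun x => x == w)).map (fun _ => pvCate row))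
theorem pvDelNull_eq_filter (l : List (List Char)) :
    pvDelNull l = l.filter (fun e => e != []) := by
  unfold pvDelNull
  simpa using PySem.List.foldl_append_if_eq_filter (fun e => e != []) l []

theorem pv_kwWords_clean (row : String) : ∀ w ∈ pvKwWords row, w ≠ [] ∧ ';' ∉ w := by
  intro w hw
  unfold pvKwWords at hw
  have h1 := List.mem_of_mem_filter hw
  have h2 := List.of_mem_filter hw
  exact ⟨by simpa using h2, pv_splitOn_clean _ w h1⟩

theorem pv_hits_clean (keywordList : List String) (w : List Char) :
    ∀ e ∈ pvHits keywordList w, e ≠ [] ∧ ';' ∉ e := by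
  intro e he
  unfold pvHits at he
  simp only [List.mem_flatMap, List.mem_map] at he
  obtain ⟨row, _, x, hx, rfl⟩ := he
  have hmem : x ∈ pvKwWords row := List.mem_of_mem_filter hx
  have hne : pvKwWords row ≠ [] := fun h => by simp [h] at hmem
  have : pvCate row ∈ pvKwWords row := by
    unfold pvCate
    cases hkw : pvKwWords row with
    | nil => exact (hne hkw).elim
    | cons a b => simp
  exact pv_kwWords_clean row _ this

theorem pv_pyGet0 (l : List (List Char)) : (PySem.List.pyGet? l (0 : Int)).getD [] = l.headD [] := by
  have : (PySem.List.pyGet? l ((0 : Nat) : Int)) = l[0]? := PySem.List.pyGet?_natCast l 0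
  simp at this
  rw [this]
  cases l <;> simp

theorem pv_inner_eq_hits (keywordList : List String) (w : List Char) (hl : List (List Char)) :
    (PySem.List.slice keywordList (some 2) none).foldl (fun hitlist row =>
      let r := PySem.Chars.lower (PySem.Chars.stripChars row.toList ['\n'])
      let lk := pvDelNull (PySem.Chars.splitOn r [';'])
      let cate := (PySem.List.pyGet? lk 0).getD []
      lk.foldl (fun hitlist x => if w == x then hitlist ++ [cate] else hitlist) hitlist) hl
    = hl ++ pvHits keywordList w := by
  rw [PySem.List.slice_from keywordList (a := 2) (by norm_num)]
  have hbody : (fun (hitlist : List (List Char)) row =>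
      let r := PySem.Chars.lower (PySem.Chars.stripChars (String.toList row) ['\n'])
      let lk := pvDelNull (PySem.Chars.splitOn r [';'])
      let cate := (PySem.List.pyGet? lk 0).getD []
      lk.foldl (fun hitlist x => if w == x then hitlist ++ [cate] else hitlist) hitlist)
      = fun hitlist row => hitlist ++ ((pvKwWords row).filter (fun x => x == w)).map (fun _ => pvCate row) := by
    funext hitlist row
    simp only [pvDelNull_eq_filter, pv_pyGet0]
    rw [PySem.List.foldl_append_if (fun x => w == x) (fun _ => ((PySem.Chars.splitOn (PySem.Chars.lower (PySem.Chars.stripChars (String.toList row) ['\n'])) [';']).filter (fun e => e != [])).headD [])]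
    have : ((PySem.Chars.splitOn (PySem.Chars.lower (PySem.Chars.stripChars (String.toList row) ['\n'])) [';']).filter (fun e => e != [])) = pvKwWords row := rfl
    rw [this]
    congr 1
    rw [List.filter_congr (fun x _ => (Bool.beq_comm : (w == x) = (x == w)))]
    rfl
  rw [hbody]
  have := PySem.List.foldl_append_eq_flatMap (fun row => ((pvKwWords row).filter (fun x => x == w)).map (fun _ => pvCate row)) (keywordList.drop (2:Int).toNat) hl
  rw [this]
  rfl

theorem pv_index_getD (keywordList : List String) (w : List Char) :
    ((PySem.List.slice keywordList (some 2) none).foldl (fun index row =>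
      let words := (PySem.Chars.splitOn (PySem.Chars.lower (PySem.Chars.stripChars row.toList ['\n'])) [';']).filter (fun w => w != [])
      if words != [] then
        let cate := words.headD []
        words.foldl (fun index w => index.modify w [] (· ++ [cate])) index
      else index) (PySem.Dict.empty : PySem.Dict (List Char) (List (List Char)))).getD w []
    = pvHits keywordList w := by
  rw [PySem.List.slice_from keywordList (a := 2) (by norm_num)]
  have hbody : (fun (index : PySem.Dict (List Char) (List (List Char))) row =>
      let words := (PySem.Chars.splitOn (PySem.Chars.lower (PySem.Chars.stripChars (String.toList row) ['\n'])) [';']).filter (fun w => w != [])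
      if words != [] then
        let cate := words.headD []
        words.foldl (fun index w => index.modify w [] (· ++ [cate])) index
      else index)
      = fun index row => ((pvKwWords row).map (fun x => (x, pvCate row))).foldl
          (fun d p => d.modify p.1 [] (· ++ [p.2])) index := by
    funext index row
    have hw : ((PySem.Chars.splitOn (PySem.Chars.lower (PySem.Chars.stripChars (String.toList row) ['\n'])) [';']).filter (fun w => w != [])) = pvKwWords row := rfl
    simp only [hw]
    by_cases hne : pvKwWords row = []
    · simp [hne]
    · rw [if_pos (by simpa using hne)]
      rw [List.foldl_map]
      rfl
  rw [hbody]
  rw [← List.foldl_flatMap (f := fun row => (pvKwWords row).map (fun x => (x, pvCate row)))]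
  rw [PySem.Dict.getD_foldl_modify_append]
  rw [PySem.Dict.getD_empty]
  rw [List.filter_flatMap, List.map_flatMap]
  unfold pvHits
  rw [show ((2:Int).toNat) = 2 from rfl]
  rw [List.nil_append]
  apply List.flatMap_congr  -- maybe wrong name
  intro row _
  rw [List.filter_map]
  rw [List.map_map]
  rfl

theorem pv_enumerate_eq (xs : List String) (s : Int) :
    PySem.List.enumerate xs s = (List.range xs.length).map (fun k : Nat => (s + (k : Int), xs.getD k "")) := by
  induction xs generalizing s with
  | nil => simp [PySem.List.enumerate]
  | cons x t ih =>
    have hstep : PySem.List.enumerate (x :: t) s = (s, x) :: PySem.List.enumerate t (s + 1) := by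
      simp [PySem.List.enumerate]
    rw [hstep, ih]
    rw [show (x :: t).length = t.length + 1 from rfl, List.range_succ_eq_map]
    rw [List.map_cons, List.map_map]
    congr 1
    · simp
    · apply List.map_congr_left
      intro k _
      simp [Nat.succ_eq_add_one]
      ring

theorem pv_A_eq (productIDList productInfoList keywordList : List String) :
    recategorize_1 productIDList productInfoList keywordList
    = (List.range productInfoList.length).map (fun k : Nat =>
        [(PySem.List.pyGet? productIDList (k : Int)).getD "",
         String.ofList (pvListToString (List.flatMap (pvHits keywordList) (pvPcWords (productInfoList.getD k ""))))]) := by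
  unfold recategorize_1
  simp only [pv_inner_eq_hits, PySem.List.foldl_append_eq_flatMap, List.nil_append]
  rw [PySem.List.pyRange_zero_natCast, List.flatMap_map, ← List.map_eq_flatMap]
  apply List.map_congr_left
  intro k hk
  rw [pvDelNull_eq_filter]
  rw [PySem.List.pyGet?_natCast productInfoList k]
  rw [show productInfoList.getD k "" = (productInfoList[k]?).getD "" from List.getD_eq_getElem?_getD]
  rfl

theorem pv_B_eq (productIDList productInfoList keywordList : List String) :
    recategorize_1_alt productIDList productInfoList keywordList
    = (List.range productInfoList.length).map (fun k : Nat =>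
        [(PySem.List.pyGet? productIDList (k : Int)).getD "",
         String.ofList (PySem.Chars.join [';'] (List.flatMap (pvHits keywordList) (pvPcWords (productInfoList.getD k ""))))]) := by
  unfold recategorize_1_alt
  simp only [pv_index_getD]
  simp only [PySem.List.foldl_if_eq_foldl_filter, PySem.List.foldl_append_eq_flatMap, List.nil_append]
  rw [pv_enumerate_eq productInfoList 0, List.flatMap_map, ← List.map_eq_flatMap]
  apply List.map_congr_left
  intro k hk
  rw [zero_add]
  rfl

-- ===== VERDICT (by name: the statement is the Claim_ definition above) =====
theorem recategorize_1_spec : Claim_equal_recategorize_1 := by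
  intro productIDList productInfoList keywordList _ _
  unfold Spec_recategorize_1
  rw [pv_A_eq, pv_B_eq]
  apply List.map_congr_left
  intro k _
  have hclean : ∀ e ∈ List.flatMap (pvHits keywordList) (pvPcWords (productInfoList.getD k "")), e ≠ [] ∧ ';' ∉ e := by
    intro e he
    obtain ⟨w, _, hw⟩ := List.mem_flatMap.mp he
    exact pv_hits_clean keywordList w e hw
  rw [pv_listToString_eq_join _ hclean]
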